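-- pv_equiv track=rewrite | github.com/avira1987/InstituteOfPsychoanalysis | app/services/reports_formatters.py | _blocks_by_empty_rows
-- ===== SOURCE A (Python) =====
-- from typing import Any, Literal
--
-- def _blocks_by_empty_rows(rows: list[list[Any]]) -> list[list[list[Any]]]:
--     """تقسیم به بلوک‌ها با ردیف خالی."""
--     blocks: list[list[list[Any]]] = []
--     cur: list[list[Any]] = []
--     for r in rows:
--         if not r:
--             if cur:
--                 blocks.append(cur)
--                 cur = []
--         else:
--             cur.append(r)
--     if cur:
--         blocks.append(cur)
--     return blocks
-- ===== SOURCE B (Python) =====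
-- from itertools import groupby
--
-- def _blocks_by_empty_rows(rows):
--     """تقسیم به بلوک‌ها با ردیف خالی."""
--     return [list(g) for empty, g in groupby(rows, key=lambda r: not r) if not empty]
-- ===== Notes on version B (the rewrite author's own statement) =====
-- stated objective: idiomatic
-- what changed: Replaces the explicit accumulator/flush loop with itertools.groupby: rows are grouped into consecutive runs keyed by emptiness and the non-empty runs are kept.
import Mathlib
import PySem

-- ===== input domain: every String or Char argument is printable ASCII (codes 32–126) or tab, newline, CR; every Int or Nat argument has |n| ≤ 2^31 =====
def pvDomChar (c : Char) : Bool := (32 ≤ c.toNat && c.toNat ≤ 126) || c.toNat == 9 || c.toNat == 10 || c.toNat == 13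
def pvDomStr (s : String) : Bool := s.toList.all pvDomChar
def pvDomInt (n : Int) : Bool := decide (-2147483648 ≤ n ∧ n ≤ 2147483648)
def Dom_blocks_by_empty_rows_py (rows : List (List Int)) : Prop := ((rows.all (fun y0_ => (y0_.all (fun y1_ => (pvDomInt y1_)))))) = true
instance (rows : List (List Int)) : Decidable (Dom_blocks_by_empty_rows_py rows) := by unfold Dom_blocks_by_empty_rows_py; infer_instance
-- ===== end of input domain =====

-- B replaces A's explicit accumulator/flush loop with a groupby-style pass:
-- rows are split into consecutive runs keyed by emptiness and the non-empty runs are kept (idiomatic).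


-- ===== PORT A =====
-- one loop step: 'if not r: (flush cur) else: cur.append(r)'
def pvStepA (st : List (List (List Int)) × List (List Int)) (r : List Int) :
    List (List (List Int)) × List (List Int) :=
  if r.isEmpty then
    (if st.2.isEmpty then st else (st.1 ++ [st.2], []))
  else
    (st.1, st.2 ++ [r])

def blocks_by_empty_rows_py (rows : List (List Int)) : List (List (List Int)) :=
  let st := rows.foldl pvStepA ([], [])
  if st.2.isEmpty then st.1 else st.1 ++ [st.2]

-- ===== PORT B =====
-- transliteration of itertools.groupby(rows, key=lambda r: not r): consecutive runs tagged with the key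
def pvGroupRuns : List (List Int) → List (Bool × List (List Int))
  | [] => []
  | r :: rs =>
    match pvGroupRuns rs with
    | [] => [(r.isEmpty, [r])]
    | (k, g) :: rest =>
      if r.isEmpty == k then (k, r :: g) :: rest
      else (r.isEmpty, [r]) :: (k, g) :: rest

def blocks_by_empty_rows_py_alt (rows : List (List Int)) : List (List (List Int)) :=
  (pvGroupRuns rows).filterMap (fun p => if p.1 then none else some p.2)

-- ===== PRECONDITION & SPEC =====
def Spec_blocks_by_empty_rows_py (rows : List (List Int)) (out : List (List (List Int))) : Prop := out = blocks_by_empty_rows_py_alt rows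
instance (rows : List (List Int)) (out : List (List (List Int))) : Decidable (Spec_blocks_by_empty_rows_py rows out) := by unfold Spec_blocks_by_empty_rows_py; infer_instance

-- ===== CLAIM (what is proved, stated in full; the proofs are below) =====
def Claim_equal_blocks_by_empty_rows_py : Prop := ∀ (rows : List (List Int)), Dom_blocks_by_empty_rows_py rows → Spec_blocks_by_empty_rows_py rows (blocks_by_empty_rows_py rows)

-- ===== LEMMAS AND PROOFS =====

def pvFinish (st : List (List (List Int)) × List (List Int)) : List (List (List Int)) :=
  if st.2.isEmpty then st.1 else st.1 ++ [st.2]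

-- already-built blocks are a pure prefix of the fold's result
theorem pvFoldA_prefix (rows : List (List Int)) :
    ∀ (blocks : List (List (List Int))) (cur : List (List Int)),
    pvFinish (rows.foldl pvStepA (blocks, cur)) =
      blocks ++ pvFinish (rows.foldl pvStepA ([], cur)) := by
  induction rows with
  | nil =>
    intro blocks cur
    simp [pvFinish]
    split_ifs <;> simp
  | cons r rs ih =>
    intro blocks cur
    simp only [List.foldl_cons, pvStepA]
    split_ifs with h1 h2
    · exact ih blocks cur
    · simp only [List.nil_append]
      rw [ih (blocks ++ [cur]) [], ih [cur] []]
      simp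
    · exact ih blocks (cur ++ [r])

-- a nonempty all-nonempty prefix merges into (or starts) the leading run
theorem pvGroupRuns_prefix (cur : List (List Int)) (xs : List (List Int))
    (hne : cur ≠ []) (hall : ∀ r ∈ cur, r.isEmpty = false) :
    pvGroupRuns (cur ++ xs) =
      match pvGroupRuns xs with
      | (false, g) :: rest => (false, cur ++ g) :: rest
      | other => (false, cur) :: other := by
  induction cur with
  | nil => exact absurd rfl hne
  | cons c cs ih =>
    have hc : c.isEmpty = false := hall c (by simp)
    cases cs with
    | nil =>
      simp only [List.cons_append, List.nil_append, pvGroupRuns]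
      match hxs : pvGroupRuns xs with
      | [] => simp [hc]
      | (false, g) :: rest => simp [hc]
      | (true, g) :: rest => simp [hc]
    | cons c2 cs2 =>
      have ih' := ih (by simp) (fun r hr => hall r (by simp [hr]))
      have hstep : pvGroupRuns (c :: (c2 :: cs2 ++ xs)) =
          match pvGroupRuns (c2 :: cs2 ++ xs) with
          | [] => [(c.isEmpty, [c])]
          | (k, g) :: rest =>
            if c.isEmpty == k then (k, c :: g) :: rest
            else (c.isEmpty, [c]) :: (k, g) :: rest := rfl
      rw [List.cons_append, hstep, ih']
      match hxs : pvGroupRuns xs with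
      | [] => simp [hc]
      | (false, g) :: rest => simp [hc]
      | (true, g) :: rest => simp [hc]

-- a leading empty row contributes nothing to B's result
theorem pvAlt_cons_empty (r : List Int) (rs : List (List Int)) (h : r.isEmpty = true) :
    blocks_by_empty_rows_py_alt (r :: rs) = blocks_by_empty_rows_py_alt rs := by
  simp only [blocks_by_empty_rows_py_alt, pvGroupRuns]
  match hxs : pvGroupRuns rs with
  | [] => simp [h]
  | (false, g) :: rest => simp [h]
  | (true, g) :: rest => simp [h]

theorem pvAlt_all_nonempty (cur : List (List Int)) (hne : cur ≠ [])
    (hall : ∀ r ∈ cur, r.isEmpty = false) :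
    blocks_by_empty_rows_py_alt cur = [cur] := by
  have := pvGroupRuns_prefix cur [] hne hall
  simp only [List.append_nil] at this
  simp [blocks_by_empty_rows_py_alt, this, pvGroupRuns]

theorem pvAlt_prefix_empty (cur : List (List Int)) (rs : List (List Int))
    (hne : cur ≠ []) (hall : ∀ r ∈ cur, r.isEmpty = false) :
    blocks_by_empty_rows_py_alt (cur ++ [] :: rs) = cur :: blocks_by_empty_rows_py_alt rs := by
  have hg := pvGroupRuns_prefix cur ([] :: rs) hne hall
  have hhead : pvGroupRuns (([] : List Int) :: rs) =
      match pvGroupRuns rs with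
      | [] => [(true, [([] : List Int)])]
      | (true, g) :: rest => (true, ([] : List Int) :: g) :: rest
      | (false, g) :: rest => (true, [([] : List Int)]) :: (false, g) :: rest := by
    simp only [pvGroupRuns]
    match hxs : pvGroupRuns rs with
    | [] => simp
    | (false, g) :: rest => simp
    | (true, g) :: rest => simp
  simp only [blocks_by_empty_rows_py_alt, hg, hhead]
  match hxs : pvGroupRuns rs with
  | [] => simp
  | (false, g) :: rest => simp
  | (true, g) :: rest => simp

-- main invariant: a pending cur of nonempty rows behaves like a prefix of the input
theorem pvMain (rows : List (List Int)) :
    ∀ (cur : List (List Int)), (∀ r ∈ cur, r.isEmpty = false) →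
    pvFinish (rows.foldl pvStepA ([], cur)) = blocks_by_empty_rows_py_alt (cur ++ rows) := by
  induction rows with
  | nil =>
    intro cur hall
    simp only [List.foldl_nil, List.append_nil, pvFinish]
    by_cases h : cur = []
    · simp [h, blocks_by_empty_rows_py_alt, pvGroupRuns]
    · rw [pvAlt_all_nonempty cur h hall]
      simp [List.isEmpty_iff, h]
  | cons r rs ih =>
    intro cur hall
    simp only [List.foldl_cons, pvStepA]
    by_cases hr : r.isEmpty
    · have hr' : r = [] := List.isEmpty_iff.mp hr
      by_cases hc : cur = []
      · simp [hr, hc]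
        rw [ih [] (by simp)]
        rw [hr', pvAlt_cons_empty [] rs (by simp)]
        simp
      · simp [hr, List.isEmpty_iff, hc]
        rw [pvFoldA_prefix rs [cur] [], ih [] (by simp)]
        rw [hr', pvAlt_prefix_empty cur rs hc hall]
        simp
    · simp [hr]
      rw [ih (cur ++ [r]) (by
        intro x hx
        rcases List.mem_append.mp hx with h1 | h1
        · exact hall x h1
        · simp at h1; subst h1; simpa using hr)]
      simp

-- ===== VERDICT (by name: the statement is the Claim_ definition above) =====
theorem blocks_by_empty_rows_py_spec : Claim_equal_blocks_by_empty_rows_py := by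
  intro rows _
  unfold Spec_blocks_by_empty_rows_py blocks_by_empty_rows_py
  have := pvMain rows [] (by simp)
  simpa [pvFinish] using this
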